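/- GENERATED by tools/from_farm_form.py from prooffarm-gif/accepted/DGifDecreaseImageCounter.E/Proof.lean (a worked proof of the farm's unit `DGifDecreaseImageCounter.E`,
   accepted by the verdict) — do not edit. -/
import Gif.Spec.Units.DGifDecreaseImageCounter_E
import Gif.Spec.AllSegs

open X86 X86.User Asan ProgX.Base ProgX.Base.Spec Gif.Spec

set_option maxRecDepth 4000
set_option maxHeartbeats 4000000

/-!
  `DGifDecreaseImageCounter.E` (0x10a531 … the `ret` at 0x10a537, 4 instructions; dgif_lib.c:1179): the epilogue of an UNPROTECTED
  function: `add rsp, 8`, `pop rbx`, `pop rbp`, `ret`. Nothing is stored: the memory at the `ret` is the memory of the cut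
  assertion `Done`, whose fields are the contract's post but for the heap's invariant, which `HeapPre.raise_back` restates at the
  caller's stack pointer.
-/

/-- The epilogue of `DGifDecreaseImageCounter` takes `Done` at 0x10a531 to `Returned`. -/
theorem Gif.Spec.Proved.DGifDecreaseImageCounter_E_ok : Gif.Spec.DGifDecreaseImageCounter_E.Statement := by
  intro Lay hLay μ hμ u₀ hcode H rest frames F R init g Hc Fc e ret v hat
  -- 1. THE PRELUDE: the cut assertion `Done` as walker facts
  have he := hat.entry
  v_entry he
  obtain ⟨henv, hrdi, himgs, hext⟩ := hat.pre
  have w_rip := hat.rip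
  have c_rsp : v.reg .rsp = e.reg .rsp - 24 := hat.rsp
  have w_kept : RegsKept [.rsp] v v := RegsKept.refl _ _
  have w_eq : Mem.EqOn ProgX.Base.L.textLo ProgX.Base.L.textHi u₀.mem v.mem := ProgX.Base.conv_code_eqOn hat.code
  have hdf := (show abiInv _ from hat.abi).1
  have hmx := (show abiInv _ from hat.abi).2
  have hsse := ProgX.Base.sseOK_of_abiInv hat.abi
  -- the slots the pops and the `ret` read
  have k_rbp : v.mem.readLE (e.reg .rsp - 8) 8 = (e.reg .rbp).toNat := hat.slot_rbp
  have k_rbx : v.mem.readLE (e.reg .rsp - 16) 8 = (e.reg .rbx).toNat := hat.slot_rbx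
  have k_ra : UInt64.ofNat (v.mem.readLE (e.reg .rsp) 8) = ret := hat.slot_ra
  -- 2. THE WALK, 0x10a531 (dgif_lib.c:1179) to the `ret` at 0x10a537
  u_walk hcode [hμ.vendor] span [ProgX.Base.L.textLo, ProgX.Base.L.textHi] side (v_side)
  -- 3. `Returned`, field by field: nothing was stored (`w_mem : s.mem = v.mem`)
  refine ReachVia.done ?_
  refine X86.User.Returned.mk w_rip w_rsp ?saved ?same (ProgX.Base.conv_code_in w_eq) ?abi ?post
  case saved =>
    -- `rbx rbp` were popped (the walker's facts); `r12 … r15` were never touched: `Done.r12 …`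
    intro r hr
    cases r <;> first
      | exact absurd hr (by decide)
      | (with_reducible assumption)
      | exact (w_kept _ rfl).trans hat.r12
      | exact (w_kept _ rfl).trans hat.r13
      | exact (w_kept _ rfl).trans hat.r14
      | exact (w_kept _ rfl).trans hat.r15
  case same =>
    -- the carried footprint is the contract's: 176 bytes of stack, the heap's region and the shadow
    simp only [X86.User.Spec.footprint, vspec]
    rw [w_mem]
    exact hat.same
  case abi =>
    -- DF and MXCSR: `add rsp, 8` writes the status flags only
    refine ProgX.Base.abiInv_of ?_ ?_
    · rw [w_flags]
      simp only [X86.User.df_setStatus]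
      exact hdf
    · rw [w_mxcsr]
      exact hmx
  case post =>
    -- `Back2` for the present heap `Hc` and forest `Fc`; the heap's invariant restated at the caller's stack pointer
    refine ⟨Hc, Fc, ⟨hat.region, ?_, ?_, ?_⟩, hat.sameBut, hat.imgs, ?_⟩
    · rw [w_mem]
      exact henv.heap.raise_back hat.inv (by omega)
    · rw [w_mem]
      exact hat.ok
    · rw [w_mem, hat.rem]
      exact Nat.le_refl _
    · rw [w_mem]
      exact hat.rem
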